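-- pv_equiv track=rewrite | github.com/AlexOAO/KGI | sample/app/services/xp_service.py | compute_xp
-- ===== SOURCE A (Python) =====
-- def compute_xp(questions: list, first_attempt_map: dict) -> int:
--     xp = 0
--     all_correct = True
--     for q in questions:
--         qid = str(q["id"])
--         correct_first = first_attempt_map.get(qid, False)
--         if correct_first:
--             xp += 15
--         else:
--             xp += 10
--             all_correct = False
--     if all_correct and questions:
--         xp += 25
--     return xp
-- ===== SOURCE B (Python) =====
-- def compute_xp(questions: list, first_attempt_map: dict) -> int:
--     # recursive count of questions missed on the first attempt
--     def wrong(qs):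
--         if not qs:
--             return 0
--         head = 0 if first_attempt_map.get(str(qs[0]["id"]), False) else 1
--         return head + wrong(qs[1:])
--
--     if not questions:
--         return 0
--     # deduct from the perfect score: 15 per question + 25 bonus,
--     # minus 5 per wrong answer, minus the bonus if anything was wrong
--     w = wrong(questions)
--     return 15 * len(questions) + 25 - 5 * w - (25 if w else 0)
-- ===== Notes on version B (the rewrite author's own statement) =====
-- stated objective: alternative
-- what changed: Replaces A's upward-accumulating loop with an all_correct flag by a structurally recursive count of wrong first attempts and a deduction-from-perfect-score formula: 15*n + 25 - 5*wrong - 25 if any wrong (0 for an empty list).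
import Mathlib
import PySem

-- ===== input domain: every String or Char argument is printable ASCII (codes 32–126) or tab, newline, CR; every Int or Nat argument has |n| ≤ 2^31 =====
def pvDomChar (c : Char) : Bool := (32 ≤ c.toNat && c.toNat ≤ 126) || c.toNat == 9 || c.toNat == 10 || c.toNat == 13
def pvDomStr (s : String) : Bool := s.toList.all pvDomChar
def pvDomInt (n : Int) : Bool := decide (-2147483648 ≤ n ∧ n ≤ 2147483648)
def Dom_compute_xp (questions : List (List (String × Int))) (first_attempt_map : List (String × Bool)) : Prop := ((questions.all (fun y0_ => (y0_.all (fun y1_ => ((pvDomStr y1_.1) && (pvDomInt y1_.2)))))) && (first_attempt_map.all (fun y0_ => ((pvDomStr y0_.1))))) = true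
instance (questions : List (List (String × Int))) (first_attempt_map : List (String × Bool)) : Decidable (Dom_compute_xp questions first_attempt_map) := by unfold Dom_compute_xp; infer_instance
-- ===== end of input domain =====

-- B replaces A's upward-accumulating loop + all_correct flag by a structurally recursive
-- wrong-count and the deduction-from-perfect formula 15n+25-5w-(25 if w>0); objective: alternative.

-- ===== PORT A =====
-- for q in questions: xp += 15 / += 10 with all_correct flag; the `none` branch (missing "id",
-- a Python KeyError) is excluded by Pre_ and merely keeps the state to stay total.
def compute_xp (questions : List (List (String × Int))) (first_attempt_map : List (String × Bool)) : Int :=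
  let st := questions.foldl (fun (st : Int × Bool) q =>
    match (PySem.Dict.mk q).get? "id" with
    | some v =>
        let qid := PySem.Int.toStr v
        let correct_first := (PySem.Dict.mk first_attempt_map).getD qid false
        if correct_first then (st.1 + 15, st.2) else (st.1 + 10, false)
    | none => st) (0, true)
  if st.2 && !questions.isEmpty then st.1 + 25 else st.1

-- ===== PORT B =====
-- Source B's nested recursive `wrong`; the `.getD 0` only totalises the missing-"id" case
-- (a KeyError in Python, outside Pre_).
def pvWrong (first_attempt_map : List (String × Bool)) : List (List (String × Int)) → Int
  | [] => 0
  | q :: qs =>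
      (if (PySem.Dict.mk first_attempt_map).getD
          (PySem.Int.toStr (((PySem.Dict.mk q).get? "id").getD 0)) false then 0 else 1)
      + pvWrong first_attempt_map qs

def compute_xp_alt (questions : List (List (String × Int))) (first_attempt_map : List (String × Bool)) : Int :=
  if questions = [] then 0
  else
    let w := pvWrong first_attempt_map questions
    15 * (questions.length : Int) + 25 - 5 * w - (if w ≠ 0 then 25 else 0)

-- ===== PRECONDITION & SPEC =====
-- Pre_ excludes exactly the questions without an "id" key, on which Python A raises KeyError.
def Pre_compute_xp (questions : List (List (String × Int))) (first_attempt_map : List (String × Bool)) : Prop :=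
  ∀ q ∈ questions, ((PySem.Dict.mk q).get? "id").isSome
instance (questions : List (List (String × Int))) (first_attempt_map : List (String × Bool)) : Decidable (Pre_compute_xp questions first_attempt_map) := by unfold Pre_compute_xp; infer_instance
def pvWitness_compute_xp : (List (List (String × Int))) × (List (String × Bool)) :=
  ([[("id", 1)], [("id", 2)]], [("1", true)])
def Spec_compute_xp (questions : List (List (String × Int))) (first_attempt_map : List (String × Bool)) (out : Int) : Prop := out = compute_xp_alt questions first_attempt_map
instance (questions : List (List (String × Int))) (first_attempt_map : List (String × Bool)) (out : Int) : Decidable (Spec_compute_xp questions first_attempt_map out) := by unfold Spec_compute_xp; infer_instance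

-- ===== CLAIM (what is proved, stated in full; the proofs are below) =====
def Claim_equal_compute_xp : Prop := ∀ (questions : List (List (String × Int))) (first_attempt_map : List (String × Bool)), Dom_compute_xp questions first_attempt_map → Pre_compute_xp questions first_attempt_map → Spec_compute_xp questions first_attempt_map (compute_xp questions first_attempt_map)

-- ===== LEMMAS AND PROOFS =====

-- the per-question predicate: correct on first attempt
def pvCorrect (first_attempt_map : List (String × Bool)) (q : List (String × Int)) : Bool :=
  (PySem.Dict.mk first_attempt_map).getD (PySem.Int.toStr (((PySem.Dict.mk q).get? "id").getD 0)) false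

-- loop invariant: A's fold from (xp, flag) yields a closed form over the counted predicate
theorem compute_xp_fold (first_attempt_map : List (String × Bool)) :
    ∀ (qs : List (List (String × Int))), (∀ q ∈ qs, ((PySem.Dict.mk q).get? "id").isSome) →
    ∀ (xp : Int) (flag : Bool),
    qs.foldl (fun (st : Int × Bool) q =>
      match (PySem.Dict.mk q).get? "id" with
      | some v =>
          let qid := PySem.Int.toStr v
          let correct_first := (PySem.Dict.mk first_attempt_map).getD qid false
          if correct_first then (st.1 + 15, st.2) else (st.1 + 10, false)
      | none => st) (xp, flag)
    = (xp + 10 * qs.length + 5 * (qs.countP (pvCorrect first_attempt_map) : Int),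
       flag && qs.all (pvCorrect first_attempt_map)) := by
  intro qs
  induction qs with
  | nil => intro _ xp flag; simp
  | cons q qs ih =>
    intro h xp flag
    obtain ⟨v, hv⟩ := Option.isSome_iff_exists.mp (h q (by simp))
    have hrest : ∀ q' ∈ qs, ((PySem.Dict.mk q').get? "id").isSome := fun q' hq' => h q' (by simp [hq'])
    have hp : pvCorrect first_attempt_map q
        = (PySem.Dict.mk first_attempt_map).getD (PySem.Int.toStr v) false := by
      simp [pvCorrect, hv]
    simp only [List.foldl_cons, hv]
    by_cases hc : (PySem.Dict.mk first_attempt_map).getD (PySem.Int.toStr v) false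
    · rw [if_pos hc]
      rw [ih hrest]
      simp [List.countP_cons, hp, hc]
      push_cast
      ring
    · rw [if_neg hc]
      rw [ih hrest]
      simp [List.countP_cons, hp, hc]
      push_cast
      ring

-- B's recursive wrong-count is the complement of the correct-count
theorem pvWrong_eq (first_attempt_map : List (String × Bool)) :
    ∀ (qs : List (List (String × Int))),
    pvWrong first_attempt_map qs
      = (qs.length : Int) - (qs.countP (pvCorrect first_attempt_map) : Int) := by
  intro qs
  induction qs with
  | nil => simp [pvWrong]
  | cons q qs ih =>
    have hh : (if (PySem.Dict.mk first_attempt_map).getD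
        (PySem.Int.toStr (((PySem.Dict.mk q).get? "id").getD 0)) false then (0 : Int) else 1)
        = if pvCorrect first_attempt_map q then 0 else 1 := rfl
    rw [pvWrong, hh, ih, List.countP_cons]
    have hle : qs.countP (pvCorrect first_attempt_map) ≤ qs.length := List.countP_le_length
    by_cases hc : pvCorrect first_attempt_map q <;> simp [hc] <;> push_cast <;> omega

theorem compute_xp_eq (questions : List (List (String × Int))) (first_attempt_map : List (String × Bool))
    (hpre : Pre_compute_xp questions first_attempt_map) :
    compute_xp questions first_attempt_map = compute_xp_alt questions first_attempt_map := by
  simp only [compute_xp, compute_xp_alt]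
  rw [compute_xp_fold first_attempt_map questions hpre 0 true]
  rw [pvWrong_eq]
  by_cases hE : questions = []
  · subst hE; simp
  · have hne' : questions.isEmpty = false := by simp [hE]
    rw [if_neg hE]
    rcases Bool.eq_false_or_eq_true (questions.all (pvCorrect first_attempt_map)) with htf | htf
    · -- all correct: countP = length, so w = 0
      have hc : questions.countP (pvCorrect first_attempt_map) = questions.length :=
        List.countP_eq_length.mpr (fun a ha => List.all_eq_true.mp htf a ha)
      have hw : ¬ ((questions.length : Int) - (questions.countP (pvCorrect first_attempt_map) : Int)) ≠ 0 := by
        rw [hc]; simp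
      rw [if_neg hw]
      simp [htf, hne', hc]
      push_cast
      ring

    · -- not all correct: countP < length, so w ≠ 0
      have hnc : questions.countP (pvCorrect first_attempt_map) ≠ questions.length := by
        intro hc
        have hmem := List.countP_eq_length.mp hc
        simp only [List.all_eq_false] at htf
        obtain ⟨x, hx, hpx⟩ := htf
        exact hpx (hmem x hx)
      have hle : questions.countP (pvCorrect first_attempt_map) ≤ questions.length :=
        List.countP_le_length
      have hw : ((questions.length : Int) - (questions.countP (pvCorrect first_attempt_map) : Int)) ≠ 0 := by
        have : questions.countP (pvCorrect first_attempt_map) < questions.length :=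
          lt_of_le_of_ne hle hnc
        omega
      rw [if_pos hw]
      simp [htf]
      push_cast
      ring
-- ===== VERDICT (by name: the statement is the Claim_ definition above) =====
theorem compute_xp_spec : Claim_equal_compute_xp := by
  intro questions first_attempt_map _ hpre
  unfold Spec_compute_xp
  exact compute_xp_eq questions first_attempt_map hpre
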